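-- pv_equiv track=rewrite | github.com/proteneer/bgl | bgl/mcgregor.py | transpose_marcs
-- ===== SOURCE A (Python) =====
-- def transpose_marcs(marcs, n_cols):
--     new_marcs = []
--     n_rows = len(marcs)
--     for col in range(n_cols):
--         col_mask = 1 << col
--         accumulant = 0
--         for row_idx, row in enumerate(marcs):
--             flag = int(row & col_mask > 0)
--             accumulant |= flag << (n_rows - row_idx - 1)
--         new_marcs.append(accumulant)
--     return new_marcs[::-1]
-- ===== SOURCE B (Python) =====
-- def transpose_marcs(marcs, n_cols):
--     if n_cols <= 0:
--         return []
--     n_rows = len(marcs)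
--     accum = [0] * n_cols
--     for row_idx, row in enumerate(marcs):
--         weight = 1 << (n_rows - 1 - row_idx)
--         m = row % (1 << n_cols)  # low n_cols bits, nonnegative (drops bits >= n_cols)
--         col = 0
--         while m:
--             if m & 1:
--                 accum[col] |= weight
--             m >>= 1
--             col += 1
--     return accum[::-1]
-- ===== Notes on version B (the rewrite author's own statement) =====
-- stated objective: alternative
-- what changed: Replaces the column-major gather (for every column, test that column's bit in every row) by a row-major scatter: each row is masked to its low n_cols bits and its set bits are peeled off one by one, OR-ing the row's weight bit into the corresponding accumulator slot.
import Mathlib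
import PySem

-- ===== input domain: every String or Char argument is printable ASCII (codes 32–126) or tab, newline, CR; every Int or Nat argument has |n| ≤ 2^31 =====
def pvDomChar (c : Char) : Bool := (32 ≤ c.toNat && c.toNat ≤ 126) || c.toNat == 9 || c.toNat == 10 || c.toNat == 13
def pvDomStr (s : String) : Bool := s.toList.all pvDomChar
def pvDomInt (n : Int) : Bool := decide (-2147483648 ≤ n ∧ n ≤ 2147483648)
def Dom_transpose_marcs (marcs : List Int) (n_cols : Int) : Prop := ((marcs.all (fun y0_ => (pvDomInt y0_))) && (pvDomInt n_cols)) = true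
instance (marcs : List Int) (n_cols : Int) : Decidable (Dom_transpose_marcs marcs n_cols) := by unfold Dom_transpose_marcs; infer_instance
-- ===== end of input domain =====

-- B rewrites the column-major gather (test every column against every row) as a row-major
-- scatter over each row's set bits; objective: alternative decomposition (same result, different traversal).

-- ===== PORT A =====
def transpose_marcs (marcs : List Int) (n_cols : Int) : List Int :=
  let n_rows := marcs.length
  let new_marcs :=
    (PySem.List.pyRange 0 n_cols).foldl
      (fun new_marcs col =>
        -- `1 << col`: col produced by range(n_cols) is nonnegative, so `.toNat` is exact
        let col_mask : Int := (1 : Int) <<< col.toNat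
        let accumulant : Int :=
          (PySem.List.enumerate marcs).foldl
            (fun accumulant p =>
              let flag : Int := if PySem.Int.band p.2 col_mask > 0 then 1 else 0
              -- `flag << (n_rows - row_idx - 1)`: the shift amount is nonnegative for enumerate indices
              PySem.Int.bor accumulant (flag <<< ((n_rows : Int) - p.1 - 1).toNat))
            0
        new_marcs ++ [accumulant])
      []
  (PySem.List.slice? new_marcs none none (-1)).getD []   -- new_marcs[::-1]; step -1 never gives none

-- ===== PORT B =====
-- `while m: if m & 1: accum[col] |= weight; m >>= 1; col += 1` — peel the set bits of m.
-- `accum[col]` is always in range since m < 2^len(accum); List.set/getD are exact there.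
def scatterRow (acc : List Int) (m : Nat) (col : Nat) (weight : Int) : List Int :=
  if h : m = 0 then acc
  else
    let acc' := if m % 2 = 1 then acc.set col (PySem.Int.bor (acc.getD col 0) weight) else acc
    scatterRow acc' (m / 2) (col + 1) weight
termination_by m
decreasing_by exact Nat.div_lt_self (Nat.pos_of_ne_zero h) (by omega)

def transpose_marcs_alt (marcs : List Int) (n_cols : Int) : List Int :=
  if n_cols ≤ 0 then []
  else
    let n_rows := marcs.length
    let accum :=
      (PySem.List.enumerate marcs).foldl
        (fun acc p =>
          let weight : Int := (1 : Int) <<< (n_rows - 1 - p.1.toNat)        -- 1 << (n_rows - 1 - row_idx)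
          let m : Nat := (PySem.Int.mod p.2 ((1 : Int) <<< n_cols.toNat)).toNat  -- row % (1 << n_cols): low n_cols bits, nonnegative
          scatterRow acc m 0 weight)
        (List.replicate n_cols.toNat 0)                                     -- [0] * n_cols
    accum.reverse                                                           -- accum[::-1]

-- ===== PRECONDITION & SPEC =====
def Spec_transpose_marcs (marcs : List Int) (n_cols : Int) (out : List Int) : Prop := out = transpose_marcs_alt marcs n_cols
instance (marcs : List Int) (n_cols : Int) (out : List Int) : Decidable (Spec_transpose_marcs marcs n_cols out) := by unfold Spec_transpose_marcs; infer_instance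

-- ===== CLAIM (what is proved, stated in full; the proofs are below) =====
def Claim_equal_transpose_marcs : Prop := ∀ (marcs : List Int) (n_cols : Int), Dom_transpose_marcs marcs n_cols → Spec_transpose_marcs marcs n_cols (transpose_marcs marcs n_cols)

-- ===== LEMMAS AND PROOFS =====

lemma enumerate_idx_nonneg {α : Type} (xs : List α) (s : Int) (hs : 0 ≤ s) :
    ∀ p ∈ PySem.List.enumerate xs s, 0 ≤ p.1 := by
  intro p hp
  rw [PySem.List.enumerate_eq_zipIdx_map] at hp
  obtain ⟨q, _, rfl⟩ := List.mem_map.mp hp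
  have : (0 : Int) ≤ (q.2 : Int) := by positivity
  omega

-- bit k of (row % 2^n) (a Nat) is exactly Python's test `row & (1 << k) > 0`, for k < n
lemma testBit_lowbits (row : Int) (n k : Nat) (hk : k < n) :
    ((PySem.Int.mod row ((1 : Int) <<< n)).toNat).testBit k
      = decide (PySem.Int.band row ((1 : Int) <<< k) > 0) := by
  have hsn : (1 : Int) <<< n = ((2^n : Nat) : Int) := by simp [Int.shiftLeft_eq]
  have hsk : (1 : Int) <<< k = ((2^k : Nat) : Int) := by simp [Int.shiftLeft_eq]
  have hpos : (0:Int) < ((2^n : Nat) : Int) := by positivity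
  rw [hsn, hsk, PySem.Int.mod_eq_emod_of_pos hpos]
  by_cases hr : 0 ≤ row
  · obtain ⟨m, rfl⟩ := Int.eq_ofNat_of_zero_le hr
    have hmod : ((m : Int) % ((2^n : Nat) : Int)) = ((m % 2^n : Nat) : Int) := by push_cast; rfl
    rw [hmod, Int.toNat_natCast, Nat.testBit_mod_two_pow, PySem.Int.band_natCast, Nat.and_two_pow]
    cases hb : m.testBit k <;> simp [hk]
  · have hrow : row = -((-row - 1).toNat : Int) - 1 := by omega
    set ma := (-row - 1).toNat with hma
    have hqr := Nat.div_add_mod ma (2^n)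
    have hlt : ma % 2^n < 2^n := Nat.mod_lt _ (by positivity)
    set N : Nat := 2^n with hN
    set q := ma / 2^n
    set r := ma % 2^n with hr'
    set s := N - 1 - r with hs
    have hc : ((N : Nat) : Int) * q + r = (ma : Int) := by exact_mod_cast hqr
    have hs' : (s : Int) = (N : Int) - 1 - r := by omega
    have h1 : row = (s : Int) + (N : Int) * (-(q:Int) - 1) := by
      rw [hs', hrow, ← hc]; ring
    have hmod : row % ((N : Nat) : Int) = ((s : Nat) : Int) := by
      rw [h1, Int.add_mul_emod_self_left]
      exact Int.emod_eq_of_lt (by positivity) (by omega)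
    -- the negative branch of Python's `&` with the nonnegative mask 2^k
    have hband : PySem.Int.band row ((2^k : Nat) : Int) = ((2^k - (2^k &&& ma) : Nat) : Int) := by
      rw [PySem.Int.band.eq_1, if_neg (by omega), if_pos (by positivity)]
      rw [Int.toNat_natCast, ← hma]
    rw [hmod, hband, Int.toNat_natCast]
    have hsucc : s = N - (r + 1) := by omega
    rw [hsucc, hN, Nat.testBit_two_pow_sub_succ hlt, hr', Nat.testBit_mod_two_pow,
        Nat.two_pow_and]
    cases hb : ma.testBit k <;> simp [hk]

lemma scatterRow_length (acc : List Int) (m : Nat) (col : Nat) (w : Int) :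
    (scatterRow acc m col w).length = acc.length := by
  fun_induction scatterRow
  case case1 a b => rfl
  case case2 a b c d e f =>
    rw [f]; show (if b % 2 = 1 then a.set c (PySem.Int.bor (a.getD c 0) w) else a).length = a.length
    split <;> simp

lemma scatterRow_getD (acc : List Int) (m : Nat) (col : Nat) (w : Int) (j : Nat) :
    (scatterRow acc m col w).getD j 0 =
      if col ≤ j ∧ m.testBit (j - col) ∧ j < acc.length
      then PySem.Int.bor (acc.getD j 0) w else acc.getD j 0 := by
  fun_induction scatterRow
  case case1 a b => simp [Nat.zero_testBit]
  case case2 a b c d e f =>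
    rw [f]
    have hlen : e.length = a.length := by
      show (if b % 2 = 1 then a.set c (PySem.Int.bor (a.getD c 0) w) else a).length = a.length
      split <;> simp
    have hget : ∀ i : Nat, e.getD i 0 =
        if i = c ∧ b % 2 = 1 ∧ c < a.length then PySem.Int.bor (a.getD c 0) w
        else a.getD i 0 := by
      intro i
      show (if b % 2 = 1 then a.set c (PySem.Int.bor (a.getD c 0) w) else a).getD i 0 = _
      by_cases hb : b % 2 = 1
      · rw [if_pos hb]
        by_cases hic : i = c
        · subst hic
          by_cases hcl : i < a.length
          · simp [List.getD_eq_getElem?_getD, hb, hcl]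
          · simp [List.getD_eq_getElem?_getD, hb, hcl]
        · have hci : ¬ c = i := fun h => hic h.symm
          simp [List.getD_eq_getElem?_getD, hic, hci]
      · simp [hb]
    rw [hlen]
    rcases Nat.lt_trichotomy j c with hc | hc | hc
    · have h1 : ¬ (c + 1 ≤ j) := by omega
      have h2 : ¬ (j = c) := by omega
      have h3 : ¬ (c ≤ j) := by omega
      have hgj : e.getD j 0 = a.getD j 0 := by rw [hget j]; exact if_neg (fun h => h2 h.1)
      rw [hgj, if_neg (fun h => h1 h.1), if_neg (fun h => h3 h.1)]
    · subst hc
      have h1 : ¬ (j + 1 ≤ j) := by omega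
      rw [if_neg (fun h => h1 h.1), hget j, Nat.sub_self, Nat.testBit_zero]
      split_ifs <;> simp_all
    · have h2 : ¬ (j = c) := by omega
      have hgj : e.getD j 0 = a.getD j 0 := by rw [hget j]; exact if_neg (fun h => h2 h.1)
      have hd : j - c = (j - (c+1)) + 1 := by omega
      rw [hgj, hd, Nat.testBit_succ]
      have hiff : (c + 1 ≤ j ∧ (b / 2).testBit (j - (c+1)) = true ∧ j < a.length)
          ↔ (c ≤ j ∧ (b / 2).testBit (j - (c+1)) = true ∧ j < a.length) := by
        constructor <;> (intro h; exact ⟨by omega, h.2.1, h.2.2⟩)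
      simp only [hiff]

lemma foldB_length (n len : Nat) (l : List (Int × Int)) :
    ∀ acc : List Int,
      (l.foldl (fun acc p =>
        scatterRow acc ((PySem.Int.mod p.2 ((1 : Int) <<< n)).toNat) 0
          ((1 : Int) <<< (len - 1 - p.1.toNat))) acc).length = acc.length := by
  induction l with
  | nil => intro acc; rfl
  | cons p l ih =>
    intro acc
    rw [List.foldl_cons, ih, scatterRow_length]

-- the scatter fold agrees, entry by entry, with A's per-column gather fold
lemma fold_pointwise (len : Nat) (n : Nat) (l : List (Int × Int)) (hl : ∀ p ∈ l, 0 ≤ p.1) :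
    ∀ acc : List Int, acc.length = n → ∀ j, j < n →
      (l.foldl (fun acc p =>
        scatterRow acc ((PySem.Int.mod p.2 ((1 : Int) <<< n)).toNat) 0
          ((1 : Int) <<< (len - 1 - p.1.toNat))) acc).getD j 0
      = l.foldl (fun accumulant p =>
          PySem.Int.bor accumulant
            ((if PySem.Int.band p.2 ((1 : Int) <<< j) > 0 then (1 : Int) else 0) <<<
              (((len : Nat) : Int) - p.1 - 1).toNat)) (acc.getD j 0) := by
  induction l with
  | nil => intro acc hlen j hj; rfl
  | cons p l ih =>
    intro acc hlen j hj
    simp only [List.foldl_cons]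
    have hp := hl p (List.mem_cons_self ..)
    rw [ih (fun q hq => hl q (List.mem_cons_of_mem _ hq)) _
        (by rw [scatterRow_length]; exact hlen) j hj]
    congr 1
    rw [scatterRow_getD, Nat.sub_zero, testBit_lowbits p.2 n j hj]
    have hexp : (((len : Nat) : Int) - p.1 - 1).toNat = len - 1 - p.1.toNat := by omega
    by_cases hb : PySem.Int.band p.2 ((1 : Int) <<< j) > 0
    · rw [if_pos ⟨Nat.zero_le j, by simp [hb], by omega⟩, if_pos hb, hexp]
    · rw [if_neg (fun h => by simp [hb] at h), if_neg hb]
      simp [PySem.Int.bor_zero]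

-- ===== VERDICT (by name: the statement is the Claim_ definition above) =====
theorem transpose_marcs_spec : Claim_equal_transpose_marcs := by
  intro marcs n_cols _
  show transpose_marcs marcs n_cols = transpose_marcs_alt marcs n_cols
  by_cases hn : n_cols ≤ 0
  · have hempty : PySem.List.pyRange 0 n_cols = [] := by
      rw [List.eq_nil_iff_forall_not_mem]
      intro x hx
      have := PySem.List.mem_pyRange_one.mp hx
      omega
    simp [transpose_marcs, transpose_marcs_alt, hempty, hn,
          PySem.List.slice?_none_none_neg_one]
  · obtain ⟨n, rfl⟩ : ∃ n : Nat, n_cols = (n : Int) :=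
      ⟨n_cols.toNat, (Int.toNat_of_nonneg (by omega)).symm⟩
    simp only [transpose_marcs, transpose_marcs_alt, if_neg hn,
               PySem.List.pyRange_zero_natCast, List.foldl_map,
               PySem.List.foldl_append_singleton_eq_map, List.nil_append,
               Int.toNat_natCast, PySem.List.slice?_none_none_neg_one, Option.getD_some]
    congr 1
    have hlenB := foldB_length n marcs.length (PySem.List.enumerate marcs)
      (List.replicate n (0 : Int))
    apply List.ext_getElem
    · simp [hlenB]
    · intro j hj1 hj2
      have hjn : j < n := by simpa using hj1
      rw [List.getElem_map, List.getElem_range,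
          ← List.getD_eq_getElem _ 0 hj2,
          fold_pointwise marcs.length n (PySem.List.enumerate marcs)
            (enumerate_idx_nonneg marcs 0 le_rfl)
            (List.replicate n (0 : Int)) (by simp) j hjn,
          List.getD_replicate _ hjn]
      simp only [Int.shiftLeft_natCast_right]
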